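-- pv_equiv track=rewrite | github.com/kamyu104/LeetCode-Solutions | Python/number-of-flowers-in-full-bloom.py | fullBloomFlowers
-- ===== SOURCE A (Python) =====
-- import bisect
-- import bisect
--
-- def fullBloomFlowers(flowers, persons):
--     """
--     :type flowers: List[List[int]]
--     :type persons: List[int]
--     :rtype: List[int]
--     """
--     starts, ends = [], []
--     for s, e in flowers:
--         starts.append(s)
--         ends.append(e+1)
--     starts.sort()
--     ends.sort()
--     return [bisect.bisect_right(starts, t)-bisect.bisect_right(ends, t) for t in persons]
-- ===== SOURCE B (Python) =====
-- def fullBloomFlowers(flowers, persons):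
--     # For each time t, directly count flowers already started minus flowers already ended.
--     return [sum((s <= t) - (e < t) for s, e in flowers) for t in persons]
-- ===== Notes on version B (the rewrite author's own statement) =====
-- stated objective: simpler
-- what changed: Replaces the sort-both-endpoint-lists-then-binary-search approach with a direct one-line count per query: for each time t, sum (s<=t)-(e<t) over the flowers, with no sorting and no bisect.
import Mathlib
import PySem

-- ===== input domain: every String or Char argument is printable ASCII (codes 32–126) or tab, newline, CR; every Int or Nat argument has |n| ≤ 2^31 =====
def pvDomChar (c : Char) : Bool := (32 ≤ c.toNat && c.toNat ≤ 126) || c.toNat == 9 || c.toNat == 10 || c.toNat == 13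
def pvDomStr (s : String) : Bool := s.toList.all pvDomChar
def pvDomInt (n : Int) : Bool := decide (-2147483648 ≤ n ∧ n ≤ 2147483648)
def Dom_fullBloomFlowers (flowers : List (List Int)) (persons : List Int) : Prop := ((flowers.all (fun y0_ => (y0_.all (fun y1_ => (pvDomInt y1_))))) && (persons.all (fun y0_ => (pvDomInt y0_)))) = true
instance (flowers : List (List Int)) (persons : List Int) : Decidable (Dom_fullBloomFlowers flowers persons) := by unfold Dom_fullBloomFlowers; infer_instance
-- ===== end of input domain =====

-- B replaces A's sort-both-endpoint-lists + bisect with a direct per-query count; objective: simpler.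

-- ===== PORT A =====
-- the 'for s, e in flowers' loop building starts and ends (ends gets e+1);
-- the match's catch-all arm is unreachable under Pre_ (Python raises on unpacking a non-pair)
def pvBuildSE (flowers : List (List Int)) : List Int × List Int :=
  flowers.foldl (fun acc f =>
    match f with
    | [s, e] => (acc.1 ++ [s], acc.2 ++ [e + 1])
    | _ => acc) ([], [])

def fullBloomFlowers (flowers : List (List Int)) (persons : List Int) : List Int :=
  let se := pvBuildSE flowers
  let starts := PySem.List.sorted se.1 (fun x => x) false
  let ends := PySem.List.sorted se.2 (fun x => x) false
  persons.map (fun t =>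
    (PySem.List.bisectRight starts t : Int) - (PySem.List.bisectRight ends t : Int))

-- ===== PORT B =====
-- sum((s <= t) - (e < t) for s, e in flowers), per person t; same unreachable catch-all
def fullBloomFlowers_alt (flowers : List (List Int)) (persons : List Int) : List Int :=
  persons.map (fun t =>
    flowers.foldl (fun (acc : Int) f =>
      match f with
      | [s, e] => acc + ((if s ≤ t then 1 else 0) - (if e < t then 1 else 0))
      | _ => acc) 0)

-- ===== PRECONDITION & SPEC =====
-- Python A raises ValueError unpacking 's, e' when an inner list is not length 2
def Pre_fullBloomFlowers (flowers : List (List Int)) (persons : List Int) : Prop :=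
  ∀ f ∈ flowers, f.length = 2
instance (flowers : List (List Int)) (persons : List Int) : Decidable (Pre_fullBloomFlowers flowers persons) := by unfold Pre_fullBloomFlowers; infer_instance

def pvWitness_fullBloomFlowers : List (List Int) × List Int :=
  ([[1, 6], [3, 7], [9, 12], [4, 13]], [2, 3, 7, 11])

def Spec_fullBloomFlowers (flowers : List (List Int)) (persons : List Int) (out : List Int) : Prop := out = fullBloomFlowers_alt flowers persons
instance (flowers : List (List Int)) (persons : List Int) (out : List Int) : Decidable (Spec_fullBloomFlowers flowers persons out) := by unfold Spec_fullBloomFlowers; infer_instance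

-- ===== CLAIM (what is proved, stated in full; the proofs are below) =====
def Claim_equal_fullBloomFlowers : Prop := ∀ (flowers : List (List Int)) (persons : List Int), Dom_fullBloomFlowers flowers persons → Pre_fullBloomFlowers flowers persons → Spec_fullBloomFlowers flowers persons (fullBloomFlowers flowers persons)

-- ===== LEMMAS AND PROOFS =====

-- prefix-true / suffix-false characterisation of countP
theorem countP_eq_of_split (xs : List Int) (p : Int → Bool) (k : Nat)
    (hk : k ≤ xs.length)
    (h1 : ∀ (j : Nat) (hj : j < xs.length), j < k → p xs[j])
    (h2 : ∀ (j : Nat) (hj : j < xs.length), k ≤ j → ¬ p xs[j]) :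
    xs.countP p = k := by
  induction xs generalizing k with
  | nil => simp at hk ⊢; omega
  | cons x xs ih =>
    cases k with
    | zero =>
      have : ∀ a ∈ x :: xs, ¬ p a := by
        intro a ha
        obtain ⟨j, hj, rfl⟩ := List.getElem_of_mem ha
        exact h2 j hj (Nat.zero_le j)
      simpa using List.countP_eq_zero.mpr this
    | succ k =>
      have hx : p x := h1 0 (by simp) (Nat.succ_pos k)
      have : xs.countP p = k := by
        refine ih k (by simpa using hk) ?_ ?_
        · intro j hj hjk
          exact h1 (j+1) (by simpa using hj) (by omega)
        · intro j hj hjk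
          exact h2 (j+1) (by simpa using hj) (by omega)
      simp [hx, this]

-- on a ≤-sorted list, bisect_right counts the elements ≤ t
theorem bisectRight_eq_countP (xs : List Int) (t : Int)
    (hs : xs.Pairwise (fun a b => a ≤ b)) :
    PySem.List.bisectRight xs t = xs.countP (fun y => decide (y ≤ t)) := by
  obtain ⟨hle, h1, h2⟩ := PySem.List.bisectRight_spec xs t hs
  refine (countP_eq_of_split xs _ _ hle ?_ ?_).symm
  · intro j hj hjk; simpa using h1 j hj hjk
  · intro j hj hjk; simpa using h2 j hj hjk

def pvFst (f : List Int) : Int := match f with | [s, _] => s | _ => 0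
def pvSnd (f : List Int) : Int := match f with | [_, e] => e | _ => 0

-- the A-side loop produces the two endpoint lists as maps
theorem pvBuildSE_eq (flowers : List (List Int)) (h : ∀ f ∈ flowers, f.length = 2)
    (acc : List Int × List Int) :
    flowers.foldl (fun acc f =>
      match f with
      | [s, e] => (acc.1 ++ [s], acc.2 ++ [e + 1])
      | _ => acc) acc
    = (acc.1 ++ flowers.map pvFst, acc.2 ++ flowers.map (fun f => pvSnd f + 1)) := by
  induction flowers generalizing acc with
  | nil => simp
  | cons f fs ih =>
    match f, h f (by simp) with
    | [s, e], _ =>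
      simp only [List.foldl_cons, List.map_cons]
      rw [ih (fun g hg => h g (by simp [hg])) _]
      simp [pvFst, pvSnd]

-- the B-side fold is the difference of two counts
theorem foldB_eq (flowers : List (List Int)) (h : ∀ f ∈ flowers, f.length = 2)
    (t : Int) (acc : Int) :
    flowers.foldl (fun (acc : Int) f =>
      match f with
      | [s, e] => acc + ((if s ≤ t then 1 else 0) - (if e < t then 1 else 0))
      | _ => acc) acc
    = acc + ((flowers.countP (fun f => decide (pvFst f ≤ t)) : Int)
             - (flowers.countP (fun f => decide (pvSnd f < t)) : Int)) := by
  induction flowers generalizing acc with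
  | nil => simp
  | cons f fs ih =>
    match f, h f (by simp) with
    | [s, e], _ =>
      simp only [List.foldl_cons, List.countP_cons]
      rw [ih (fun g hg => h g (by simp [hg]))]
      simp only [pvFst, pvSnd]
      by_cases h1 : s ≤ t <;> by_cases h2 : e < t <;>
        simp [h1, h2] <;> ring

theorem fullBloomFlowers_spec : Claim_equal_fullBloomFlowers := by
  intro flowers persons _ hpre
  unfold Spec_fullBloomFlowers fullBloomFlowers fullBloomFlowers_alt
  simp only
  refine List.map_congr_left ?_
  intro t _
  have hse := pvBuildSE_eq flowers hpre ([], [])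
  have hs : PySem.List.bisectRight (PySem.List.sorted (pvBuildSE flowers).1 (fun x => x) false) t
      = (flowers.map pvFst).countP (fun y => decide (y ≤ t)) := by
    rw [bisectRight_eq_countP _ _ (by simpa using PySem.List.sorted_pairwise (pvBuildSE flowers).1 (fun x => x))]
    rw [(PySem.List.sorted_perm (pvBuildSE flowers).1 (fun x => x) false).countP_eq]
    rw [show (pvBuildSE flowers).1 = flowers.map pvFst by rw [pvBuildSE, hse]; simp]
  have he : PySem.List.bisectRight (PySem.List.sorted (pvBuildSE flowers).2 (fun x => x) false) t
      = (flowers.map (fun f => pvSnd f + 1)).countP (fun y => decide (y ≤ t)) := by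
    rw [bisectRight_eq_countP _ _ (by simpa using PySem.List.sorted_pairwise (pvBuildSE flowers).2 (fun x => x))]
    rw [(PySem.List.sorted_perm (pvBuildSE flowers).2 (fun x => x) false).countP_eq]
    rw [show (pvBuildSE flowers).2 = flowers.map (fun f => pvSnd f + 1) by rw [pvBuildSE, hse]; simp]
  rw [hs, he, foldB_eq flowers hpre t 0]
  rw [List.countP_map, List.countP_map]
  have : (fun f => decide (pvSnd f + 1 ≤ t)) = (fun f => decide (pvSnd f < t)) := by
    funext f; simp
  rw [show ((fun y => decide (y ≤ t)) ∘ pvFst) = (fun f => decide (pvFst f ≤ t)) from rfl,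
      show ((fun y => decide (y ≤ t)) ∘ (fun f => pvSnd f + 1)) = (fun f => decide (pvSnd f + 1 ≤ t)) from rfl,
      this]
  ring
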